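-- pv_equiv track=rewrite | github.com/bassosimone/measurement-kit-headers | build/documentation.py | gather_comments
-- ===== SOURCE A (Python) =====
-- def gather_comments(iterable):
--     paragraphs = []
--     current = []
--     for index, line in enumerate(iterable):
--         if index < 4:
--             continue
--         eop = False
--         line = line.lstrip()
--         if line.startswith("//"):
--             line = line.replace("//", "")
--             line = line.strip()
--             current.append(line)
--             if not line:
--                 eop = True
--         else:
--             eop = True
--         if eop:
--             paragraphs.append(" ".join(current))
--             current = []
--     if current:
--         paragraphs.append(" ".join(current))
--     paragraphs = [elem for elem in paragraphs if bool(elem)]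
--     return "\n\n".join(paragraphs)
-- ===== SOURCE B (Python) =====
-- def gather_comments(iterable):
--     # Tokenize: each relevant line becomes comment-word tokens and/or a BREAK
--     # sentinel (None); then split the token stream on BREAK into paragraphs.
--     tokens = []
--     for line in list(iterable)[4:]:
--         s = line.lstrip()
--         if s.startswith("//"):
--             w = s.replace("//", "").strip()
--             tokens.append(w)
--             if not w:
--                 tokens.append(None)
--         else:
--             tokens.append(None)
--     done, seg = [], []
--     for t in tokens:
--         if t is None:
--             done.append(seg)
--             seg = []
--         else:
--             seg.append(t)
--     done.append(seg)
--     joined = [" ".join(s) for s in done]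
--     return "\n\n".join(p for p in joined if p)
-- ===== Notes on version B (the rewrite author's own statement) =====
-- stated objective: alternative
-- what changed: Replaced the flag-driven accumulate-and-flush fold over enumerated lines with a tokenize-then-split pipeline: lines map to word/BREAK tokens, the token stream is split on BREAK into paragraphs, which are joined and filtered.
import Mathlib
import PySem

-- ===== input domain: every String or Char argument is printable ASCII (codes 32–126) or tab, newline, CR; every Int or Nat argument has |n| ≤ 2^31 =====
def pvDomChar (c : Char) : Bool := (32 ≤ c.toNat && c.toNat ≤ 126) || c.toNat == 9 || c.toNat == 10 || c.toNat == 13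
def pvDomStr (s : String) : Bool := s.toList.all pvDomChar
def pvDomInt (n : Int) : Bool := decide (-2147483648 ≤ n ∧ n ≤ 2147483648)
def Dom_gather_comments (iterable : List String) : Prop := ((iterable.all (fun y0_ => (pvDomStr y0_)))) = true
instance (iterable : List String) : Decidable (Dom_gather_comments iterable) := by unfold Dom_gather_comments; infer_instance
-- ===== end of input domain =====

-- B restructures A's accumulate-and-flush fold as a tokenize-then-split pipeline (alternative decomposition, same cost).

-- ===== PORT A =====
-- The loop body of A, named (state = (paragraphs, current)).
def gcStepA (st : List String × List String) (p : Int × String) : List String × List String :=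
  if p.1 < 4 then st
  else
    let line := PySem.Str.lstrip p.2
    if PySem.Str.startswith line "//" then
      let line := PySem.Str.strip (PySem.Str.replace line "//" "")
      let current := st.2 ++ [line]
      if line == "" then (st.1 ++ [PySem.Str.join " " current], ([] : List String))
      else (st.1, current)
    else (st.1 ++ [PySem.Str.join " " st.2], [])

def gather_comments (iterable : List String) : String :=
  let st := (PySem.List.enumerate iterable 0).foldl gcStepA ([], [])
  let paragraphs := if st.2 ≠ [] then st.1 ++ [PySem.Str.join " " st.2] else st.1
  PySem.Str.join "\n\n" (paragraphs.filter (fun e => e != ""))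

-- ===== PORT B =====
-- Tokens a single line contributes: comment word(s) and/or a paragraph BREAK (none).
def gcToken (line : String) : List (Option String) :=
  let s := PySem.Str.lstrip line
  if PySem.Str.startswith s "//" then
    let w := PySem.Str.strip (PySem.Str.replace s "//" "")
    if w == "" then [some w, none] else [some w]
  else [none]

-- Splitting step: a BREAK closes the open segment, a word extends it.
def gcStepB (st : List (List String) × List String) (t : Option String) :
    List (List String) × List String :=
  match t with
  | none => (st.1 ++ [st.2], [])
  | some w => (st.1, st.2 ++ [w])

def gather_comments_alt (iterable : List String) : String :=
  let tokens := (PySem.List.slice iterable (some 4) none).foldl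
    (fun acc line => acc ++ gcToken line) []
  let st := tokens.foldl gcStepB ([], [])
  let joined := (st.1 ++ [st.2]).map (PySem.Str.join " ")
  PySem.Str.join "\n\n" (joined.filter (fun p => p != ""))

-- ===== PRECONDITION & SPEC =====
def Spec_gather_comments (iterable : List String) (out : String) : Prop := out = gather_comments_alt iterable
instance (iterable : List String) (out : String) : Decidable (Spec_gather_comments iterable out) := by unfold Spec_gather_comments; infer_instance

-- ===== CLAIM (what is proved, stated in full; the proofs are below) =====
def Claim_equal_gather_comments : Prop := ∀ (iterable : List String), Dom_gather_comments iterable → Spec_gather_comments iterable (gather_comments iterable)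

-- ===== LEMMAS AND PROOFS =====

-- A's loop body once the index test no longer fires.
def gcStepA' (st : List String × List String) (line0 : String) : List String × List String :=
  let line := PySem.Str.lstrip line0
  if PySem.Str.startswith line "//" then
    let line := PySem.Str.strip (PySem.Str.replace line "//" "")
    let current := st.2 ++ [line]
    if line == "" then (st.1 ++ [PySem.Str.join " " current], ([] : List String))
    else (st.1, current)
  else (st.1 ++ [PySem.Str.join " " st.2], [])

theorem gcStepA_ge (st : List String × List String) (k : Int) (l : String) (hk : 4 ≤ k) :
    gcStepA st (k, l) = gcStepA' st l := by
  simp [gcStepA, gcStepA', not_lt.mpr hk]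

theorem foldA_ge (lines : List String) : ∀ (k : Int) (st : List String × List String), 4 ≤ k →
    (PySem.List.enumerate lines k).foldl gcStepA st = lines.foldl gcStepA' st := by
  induction lines with
  | nil => intro k st _; simp [PySem.List.enumerate_nil]
  | cons l ls ih =>
      intro k st hk
      rw [PySem.List.enumerate_cons]
      simp only [List.foldl_cons]
      rw [gcStepA_ge st k l hk, ih (k + 1) _ (by omega)]

theorem foldA_skip (lines : List String) : ∀ (k : Int) (st : List String × List String),
    0 ≤ k → k ≤ 4 →
    (PySem.List.enumerate lines k).foldl gcStepA st = (lines.drop (4 - k).toNat).foldl gcStepA' st := by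
  induction lines with
  | nil => intro k st _ _; simp [PySem.List.enumerate_nil]
  | cons l ls ih =>
      intro k st hk0 hk4
      rw [PySem.List.enumerate_cons]
      simp only [List.foldl_cons]
      by_cases h : k < 4
      · have hstep : gcStepA st (k, l) = st := by simp [gcStepA, h]
        rw [hstep, ih (k + 1) st (by omega) (by omega)]
        have hdrop : (4 - k).toNat = (4 - (k + 1)).toNat + 1 := by omega
        rw [hdrop, List.drop_succ_cons]
      · have hk : k = 4 := by omega
        subst hk
        rw [gcStepA_ge st 4 l (by omega), foldA_ge ls (4 + 1) _ (by omega)]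
        simp

-- Per-line correspondence: one A'-step equals the B-steps of that line's tokens.
theorem step_line (line : String) (S : List (List String)) (C : List String) :
    gcStepA' (S.map (PySem.Str.join " "), C) line =
      (((gcToken line).foldl gcStepB (S, C)).1.map (PySem.Str.join " "),
       ((gcToken line).foldl gcStepB (S, C)).2) := by
  simp only [gcStepA', gcToken]
  split_ifs with hc he
  · simp [gcStepB]
  · simp [gcStepB]
  · simp [gcStepB]

-- Whole-loop correspondence on the suffix after the skipped prefix.
theorem fold_corr (lines : List String) : ∀ (S : List (List String)) (C : List String),
    lines.foldl gcStepA' (S.map (PySem.Str.join " "), C) =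
      ((lines.foldl (fun acc line => acc ++ gcToken line) [] |>.foldl gcStepB (S, C)).1.map
         (PySem.Str.join " "),
       (lines.foldl (fun acc line => acc ++ gcToken line) [] |>.foldl gcStepB (S, C)).2) := by
  induction lines with
  | nil => intro S C; simp
  | cons l ls ih =>
      intro S C
      have htok : (l :: ls).foldl (fun acc line => acc ++ gcToken line) ([] : List (Option String))
          = gcToken l ++ ls.foldl (fun acc line => acc ++ gcToken line) [] := by
        rw [List.foldl_cons]
        rw [PySem.List.foldl_append_eq_flatMap, PySem.List.foldl_append_eq_flatMap]
        simp
      rw [htok, List.foldl_cons, List.foldl_append, step_line l S C]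
      exact ih _ _

-- Finalisation: A's conditional trailing flush agrees with B's unconditional one after filtering.
theorem finalize_corr (S : List (List String)) (C : List String) :
    (if C ≠ [] then S.map (PySem.Str.join " ") ++ [PySem.Str.join " " C]
     else S.map (PySem.Str.join " ")).filter (fun e => e != "")
      = ((S ++ [C]).map (PySem.Str.join " ")).filter (fun p => p != "") := by
  by_cases h : C = []
  · subst h
    simp [List.map_append, List.filter_append, PySem.Str.join]
  · simp [h, List.map_append, List.filter_append]

-- ===== VERDICT (by name: the statement is the Claim_ definition above) =====
theorem gather_comments_spec : Claim_equal_gather_comments := by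
  intro iterable _
  show gather_comments iterable = gather_comments_alt iterable
  have hslice : PySem.List.slice iterable (some 4) none = iterable.drop 4 := by
    rw [PySem.List.slice_from] <;> simp
  simp only [gather_comments, gather_comments_alt, hslice]
  rw [foldA_skip iterable 0 ([], []) (by omega) (by omega)]
  have h0 : (([], []) : List String × List String) = (([] : List (List String)).map (PySem.Str.join " "), ([] : List String)) := by simp
  rw [h0, fold_corr]
  have h4 : (4 - (0:Int)).toNat = 4 := by decide
  rw [h4]
  exact congrArg _ (finalize_corr _ _)
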